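-- pv_equiv track=rewrite | github.com/ashudnsingh/CodeSignal | Graphs/Neverending Grids/031 - mobiusConquer.py | mobiusConquer
-- ===== SOURCE A (Python) =====
-- def mobiusConquer(g, r, e, b):
--     r, e, b = tuple(r), tuple(e), {tuple(a) for a in b}
--     lr, le, v, cr, ce, (h, w) = {r}, {e}, {r, e} | b, set(), set(), g
--
--     def mv(l):
--         n = set()
--
--         for s, i, j in l:
--             if j < w - 1:
--                 n.add((s, i, j + 1))
--             else:
--                 n.add((1 - s, i, (j + w + 1) % w))
--
--             if i < h - 1:
--                 n.add((s, i + 1, j))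
--
--             if 0 < j:
--                 n.add((s, i, j - 1))
--             else:
--                 n.add((1 - s, i, (j + w - 1) % w))
--
--             if 0 < i:
--                 n.add((s, i - 1, j))
--
--         return n - v
--
--     while lr or le:
--         lr, le = mv(lr), mv(le)
--         cr, ce = cr | (lr - le - ce), ce | (le - lr - cr)
--         v |= lr | le
--
--     return [len(cr) + 1, len(ce) + 1]
-- ===== SOURCE B (Python) =====
-- def mobiusConquer(g, r, e, b):
--     h, w = g
--     r, e = tuple(r), tuple(e)
--     walls = {tuple(a) for a in b} | {r, e}
--
--     def nbrs(c):
--         s, i, j = c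
--         out = []
--         if j < w - 1:
--             out.append((s, i, j + 1))
--         else:
--             out.append((1 - s, i, (j + w + 1) % w))
--         if i < h - 1:
--             out.append((s, i + 1, j))
--         if 0 < j:
--             out.append((s, i, j - 1))
--         else:
--             out.append((1 - s, i, (j + w - 1) % w))
--         if 0 < i:
--             out.append((s, i - 1, j))
--         return out
--
--     def bfs(src):
--         dist = {src: 0}
--         seen = set(walls)
--         frontier = {src}
--         d = 0
--         while frontier:
--             d += 1
--             reach = set()
--             for c in frontier:
--                 reach.update(nbrs(c))
--             frontier = reach - seen
--             seen |= frontier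
--             for c in frontier:
--                 dist[c] = d
--         return dist
--
--     dr, de = bfs(r), bfs(e)
--     rc = sum(1 for y, dy in dr.items() if y != r and (y not in de or dy < de[y]))
--     ec = sum(1 for y, dy in de.items() if y != e and (y not in dr or dy < dr[y]))
--     return [rc + 1, ec + 1]
-- ===== Notes on version B (the rewrite author's own statement) =====
-- stated objective: alternative
-- what changed: Replaces A's coupled lockstep two-frontier BFS race (shared visited set, per-round set algebra on claimed/contested cells) by two independent single-source BFS distance maps over the same Moebius-wrap neighbor rule, followed by one counting pass that awards a cell to the strictly closer source and leaves ties to neither.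
import Mathlib
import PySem

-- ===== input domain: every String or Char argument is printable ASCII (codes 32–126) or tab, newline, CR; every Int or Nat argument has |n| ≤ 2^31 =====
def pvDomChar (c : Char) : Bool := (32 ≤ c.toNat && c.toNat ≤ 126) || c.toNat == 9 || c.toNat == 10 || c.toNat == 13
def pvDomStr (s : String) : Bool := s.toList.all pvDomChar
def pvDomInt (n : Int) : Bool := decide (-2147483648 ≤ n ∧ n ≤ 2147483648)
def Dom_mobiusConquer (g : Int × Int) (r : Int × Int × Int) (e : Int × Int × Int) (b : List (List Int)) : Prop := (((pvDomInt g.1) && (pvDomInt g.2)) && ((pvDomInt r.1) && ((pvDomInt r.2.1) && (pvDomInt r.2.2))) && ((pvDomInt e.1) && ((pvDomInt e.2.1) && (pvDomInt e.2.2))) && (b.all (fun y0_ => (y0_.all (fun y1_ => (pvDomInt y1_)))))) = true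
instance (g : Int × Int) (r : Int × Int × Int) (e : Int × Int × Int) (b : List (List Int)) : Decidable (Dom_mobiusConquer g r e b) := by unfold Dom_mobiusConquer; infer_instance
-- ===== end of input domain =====

-- B replaces A's coupled lockstep two-frontier BFS race by two independent BFS distance
-- maps compared in one counting pass (objective: alternative decomposition, same cost).
-- Python sets/dicts are ported as Std.HashSet / Std.HashMap: both programs consume them
-- only through membership, insertion, size and order-insensitive counting, never through
-- iteration order, so hashed containers are exact here (and evaluate at Python-like cost).

-- Python set operations shared by both ports: s | t, s - t, s.update(xs)
def pvHsUnion (a b : Std.HashSet (Int × Int × Int)) : Std.HashSet (Int × Int × Int) :=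
  Std.HashSet.fold (fun s x => s.insert x) a b

def pvHsDiff (a b : Std.HashSet (Int × Int × Int)) : Std.HashSet (Int × Int × Int) :=
  Std.HashSet.filter (fun x => !b.contains x) a

def pvHsUpdate (s : Std.HashSet (Int × Int × Int)) (xs : List (Int × Int × Int)) :
    Std.HashSet (Int × Int × Int) :=
  xs.foldl (fun s x => s.insert x) s

-- ===== PORT A =====
-- rows of b that are not 3 element lists become tuples of arity ≠ 3 in Python: they sit in
-- the visited set but can never compare equal to any 3-tuple cell, so they never influence
-- the returned value; the port drops them (exact for the return value).
def pvWalls3 (b : List (List Int)) : List (Int × Int × Int) :=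
  b.filterMap (fun row => match row with | [x, y, z] => some (x, y, z) | _ => none)

-- totality guard for the while-loops: an over-approximation of the number of rounds any of
-- the loops can run (all cells ever reached lie in a box of at most this size); the proofs
-- never need it — both ports use the SAME fuel and agree at every round count.
def pvFuel (g : Int × Int) (r : Int × Int × Int) (e : Int × Int × Int) : Nat :=
  4 * (g.1.natAbs + r.2.1.natAbs + e.2.1.natAbs + 2) * (g.2.natAbs + r.2.2.natAbs + e.2.2.natAbs + 2) + 2

-- body of A's `mv` inner loop for one cell (the four if/else `n.add(…)`)
def pvMvCell (h w : Int) (n : Std.HashSet (Int × Int × Int)) (c : Int × Int × Int) :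
    Std.HashSet (Int × Int × Int) :=
  let s := c.1; let i := c.2.1; let j := c.2.2
  let n1 := if j < w - 1 then n.insert (s, i, j + 1)
            else n.insert (1 - s, i, PySem.Int.mod (j + w + 1) w)
  let n2 := if i < h - 1 then n1.insert (s, i + 1, j) else n1
  let n3 := if 0 < j then n2.insert (s, i, j - 1)
            else n2.insert (1 - s, i, PySem.Int.mod (j + w - 1) w)
  if 0 < i then n3.insert (s, i - 1, j) else n3

-- A's `mv(l)` (reads the enclosing v)
def pvMv (h w : Int) (v l : Std.HashSet (Int × Int × Int)) : Std.HashSet (Int × Int × Int) :=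
  pvHsDiff (Std.HashSet.fold (pvMvCell h w) ∅ l) v

-- one iteration of A's while-loop body; state = (lr, le, v, cr, ce)
def pvStepA (h w : Int)
    (st : Std.HashSet (Int × Int × Int) × Std.HashSet (Int × Int × Int) × Std.HashSet (Int × Int × Int) ×
          Std.HashSet (Int × Int × Int) × Std.HashSet (Int × Int × Int)) :
    Std.HashSet (Int × Int × Int) × Std.HashSet (Int × Int × Int) × Std.HashSet (Int × Int × Int) ×
    Std.HashSet (Int × Int × Int) × Std.HashSet (Int × Int × Int) :=
  let lr' := pvMv h w st.2.2.1 st.1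
  let le' := pvMv h w st.2.2.1 st.2.1
  (lr', le',
   pvHsUnion st.2.2.1 (pvHsUnion lr' le'),
   pvHsUnion st.2.2.2.1 (pvHsDiff (pvHsDiff lr' le') st.2.2.2.2),
   pvHsUnion st.2.2.2.2 (pvHsDiff (pvHsDiff le' lr') st.2.2.2.1))

def pvLoopA (h w : Int) :
    Nat → (Std.HashSet (Int × Int × Int) × Std.HashSet (Int × Int × Int) × Std.HashSet (Int × Int × Int) ×
           Std.HashSet (Int × Int × Int) × Std.HashSet (Int × Int × Int)) → List Int
  | fuel, st =>
    if st.1.isEmpty ∧ st.2.1.isEmpty then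
      [(st.2.2.2.1.size : Int) + 1, (st.2.2.2.2.size : Int) + 1]
    else
      match fuel with
      | 0 => [(st.2.2.2.1.size : Int) + 1, (st.2.2.2.2.size : Int) + 1]
      | f + 1 => pvLoopA h w f (pvStepA h w st)

def mobiusConquer (g : Int × Int) (r : Int × Int × Int) (e : Int × Int × Int) (b : List (List Int)) : List Int :=
  pvLoopA g.1 g.2 (pvFuel g r e)
    (Std.HashSet.ofList [r], Std.HashSet.ofList [e],
     pvHsUnion (Std.HashSet.ofList [r, e]) (Std.HashSet.ofList (pvWalls3 b)),
     ∅, ∅)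

-- ===== PORT B =====
-- B's `nbrs(c)`: the list of Moebius neighbors of one cell, in append order
def pvNbrs (h w : Int) (c : Int × Int × Int) : List (Int × Int × Int) :=
  let s := c.1; let i := c.2.1; let j := c.2.2
  (if j < w - 1 then [(s, i, j + 1)] else [(1 - s, i, PySem.Int.mod (j + w + 1) w)])
  ++ (if i < h - 1 then [(s, i + 1, j)] else [])
  ++ (if 0 < j then [(s, i, j - 1)] else [(1 - s, i, PySem.Int.mod (j + w - 1) w)])
  ++ (if 0 < i then [(s, i - 1, j)] else [])

-- one iteration of B's bfs while-loop body; state = (dist, seen, frontier, d)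
def pvStepB (h w : Int)
    (st : Std.HashMap (Int × Int × Int) Int × Std.HashSet (Int × Int × Int) ×
          Std.HashSet (Int × Int × Int) × Int) :
    Std.HashMap (Int × Int × Int) Int × Std.HashSet (Int × Int × Int) ×
    Std.HashSet (Int × Int × Int) × Int :=
  let d' := st.2.2.2 + 1
  let reach := Std.HashSet.fold (fun n c => pvHsUpdate n (pvNbrs h w c)) (∅ : Std.HashSet (Int × Int × Int)) st.2.2.1
  let fr' := pvHsDiff reach st.2.1
  (Std.HashSet.fold (fun dd c => dd.insert c d') st.1 fr', pvHsUnion st.2.1 fr', fr', d')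

def pvBfsLoop (h w : Int) :
    Nat → (Std.HashMap (Int × Int × Int) Int × Std.HashSet (Int × Int × Int) ×
           Std.HashSet (Int × Int × Int) × Int) → Std.HashMap (Int × Int × Int) Int
  | fuel, st =>
    if st.2.2.1.isEmpty then st.1
    else
      match fuel with
      | 0 => st.1
      | f + 1 => pvBfsLoop h w f (pvStepB h w st)

def pvBfs (h w : Int) (walls : Std.HashSet (Int × Int × Int)) (src : Int × Int × Int) (fuel : Nat) :
    Std.HashMap (Int × Int × Int) Int :=
  pvBfsLoop h w fuel ((∅ : Std.HashMap (Int × Int × Int) Int).insert src 0, walls,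
    Std.HashSet.ofList [src], 0)

def mobiusConquer_alt (g : Int × Int) (r : Int × Int × Int) (e : Int × Int × Int) (b : List (List Int)) : List Int :=
  let walls := pvHsUnion (Std.HashSet.ofList (pvWalls3 b)) (Std.HashSet.ofList [r, e])
  let dr := pvBfs g.1 g.2 walls r (pvFuel g r e)
  let de := pvBfs g.1 g.2 walls e (pvFuel g r e)
  let rc := dr.toList.countP (fun p => decide (p.1 ≠ r) &&
              (match de[p.1]? with | none => true | some m => decide (p.2 < m)))
  let ec := de.toList.countP (fun p => decide (p.1 ≠ e) &&
              (match dr[p.1]? with | none => true | some m => decide (p.2 < m)))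
  [(rc : Int) + 1, (ec : Int) + 1]

-- ===== PRECONDITION & SPEC =====
-- Pre_ excludes exactly w = 0 (g = (h, w)): there Python A always hits `% w` and raises
-- ZeroDivisionError (B raises the same way); A returns normally on every other input.
def Pre_mobiusConquer (g : Int × Int) (r : Int × Int × Int) (e : Int × Int × Int) (b : List (List Int)) : Prop :=
  g.2 ≠ 0
instance (g : Int × Int) (r : Int × Int × Int) (e : Int × Int × Int) (b : List (List Int)) : Decidable (Pre_mobiusConquer g r e b) := by unfold Pre_mobiusConquer; infer_instance

def pvWitness_mobiusConquer : (Int × Int) × (Int × Int × Int) × (Int × Int × Int) × List (List Int) :=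
  ((2, 2), (0, 0, 0), (0, 1, 1), [[0, 1, 0]])

def Spec_mobiusConquer (g : Int × Int) (r : Int × Int × Int) (e : Int × Int × Int) (b : List (List Int)) (out : List Int) : Prop := out = mobiusConquer_alt g r e b
instance (g : Int × Int) (r : Int × Int × Int) (e : Int × Int × Int) (b : List (List Int)) (out : List Int) : Decidable (Spec_mobiusConquer g r e b out) := by unfold Spec_mobiusConquer; infer_instance

-- ===== CLAIM (what is proved, stated in full; the proofs are below) =====
def Claim_equal_mobiusConquer : Prop := ∀ (g : Int × Int) (r : Int × Int × Int) (e : Int × Int × Int) (b : List (List Int)), Dom_mobiusConquer g r e b → Pre_mobiusConquer g r e b → Spec_mobiusConquer g r e b (mobiusConquer g r e b)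

-- ===== LEMMAS AND PROOFS =====

-- membership facts for the Python set-operation helpers
theorem pv_mem_filter (s : Std.HashSet (Int × Int × Int)) (f : (Int × Int × Int) → Bool)
    (k : Int × Int × Int) : k ∈ Std.HashSet.filter f s ↔ k ∈ s ∧ f k = true := by
  rw [Std.HashSet.mem_filter]
  constructor
  · rintro ⟨h, hf⟩
    rw [Std.HashSet.get_eq] at hf
    exact ⟨h, hf⟩
  · rintro ⟨h, hf⟩
    exact ⟨h, by rw [Std.HashSet.get_eq]; exact hf⟩

theorem pv_mem_hsDiff (a b : Std.HashSet (Int × Int × Int)) (y : Int × Int × Int) :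
    y ∈ pvHsDiff a b ↔ y ∈ a ∧ y ∉ b := by
  rw [pvHsDiff, pv_mem_filter]
  rw [Bool.not_eq_true']
  rw [← Std.HashSet.contains_iff_mem (m := b) (a := y)]
  simp

theorem pv_mem_insertList (xs : List (Int × Int × Int)) (s0 : Std.HashSet (Int × Int × Int))
    (y : Int × Int × Int) :
    y ∈ xs.foldl (fun s x => s.insert x) s0 ↔ y ∈ s0 ∨ y ∈ xs := by
  induction xs generalizing s0 with
  | nil => simp
  | cons a t ih =>
    rw [List.foldl_cons, ih]
    rw [Std.HashSet.mem_insert]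
    simp only [beq_iff_eq, List.mem_cons]
    tauto

theorem pv_mem_hsUnion (a b : Std.HashSet (Int × Int × Int)) (y : Int × Int × Int) :
    y ∈ pvHsUnion a b ↔ y ∈ a ∨ y ∈ b := by
  rw [pvHsUnion, Std.HashSet.fold_eq_foldl_toList, pv_mem_insertList, Std.HashSet.mem_toList]

theorem pv_mem_hsUpdate (s : Std.HashSet (Int × Int × Int)) (xs : List (Int × Int × Int))
    (y : Int × Int × Int) : y ∈ pvHsUpdate s xs ↔ y ∈ s ∨ y ∈ xs :=
  pv_mem_insertList xs s y

-- the loop-body of A's mv is exactly "add all Moebius neighbors"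
theorem pvMvCell_eq_update (h w : Int) (n : Std.HashSet (Int × Int × Int)) (c : Int × Int × Int) :
    pvMvCell h w n c = pvHsUpdate n (pvNbrs h w c) := by
  rcases c with ⟨s, i, j⟩
  simp only [pvMvCell, pvNbrs, pvHsUpdate]
  split_ifs <;> rfl

theorem pv_mem_foldl_update (h w : Int) (l : List (Int × Int × Int))
    (init : Std.HashSet (Int × Int × Int)) (y : Int × Int × Int) :
    y ∈ l.foldl (pvMvCell h w) init ↔ y ∈ init ∨ ∃ c ∈ l, y ∈ pvNbrs h w c := by
  induction l generalizing init with
  | nil => simp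
  | cons a t ih =>
    rw [List.foldl_cons, ih, pvMvCell_eq_update, pv_mem_hsUpdate]
    simp only [List.mem_cons]
    constructor
    · rintro ((hy | hy) | ⟨c, hc, hy⟩)
      · exact Or.inl hy
      · exact Or.inr ⟨a, Or.inl rfl, hy⟩
      · exact Or.inr ⟨c, Or.inr hc, hy⟩
    · rintro (hy | ⟨c, (rfl | hc), hy⟩)
      · exact Or.inl (Or.inl hy)
      · exact Or.inl (Or.inr hy)
      · exact Or.inr ⟨c, hc, hy⟩

theorem pv_mem_pvMv (h w : Int) (v l : Std.HashSet (Int × Int × Int)) (y : Int × Int × Int) :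
    y ∈ pvMv h w v l ↔ (∃ c ∈ l, y ∈ pvNbrs h w c) ∧ y ∉ v := by
  rw [pvMv, pv_mem_hsDiff, Std.HashSet.fold_eq_foldl_toList, pv_mem_foldl_update]
  simp only [Std.HashSet.not_mem_empty, false_or, Std.HashSet.mem_toList]

theorem pv_get?_foldl_insert_const (l : List (Int × Int × Int)) (v : Int)
    (d0 : Std.HashMap (Int × Int × Int) Int) (y : Int × Int × Int) :
    (l.foldl (fun dd c => dd.insert c v) d0)[y]? = if y ∈ l then some v else d0[y]? := by
  induction l generalizing d0 with
  | nil => simp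
  | cons a t ih =>
    rw [List.foldl_cons, ih, Std.HashMap.getElem?_insert]
    simp only [beq_iff_eq, List.mem_cons]
    by_cases hyt : y ∈ t <;> by_cases hya : a = y <;> simp [hyt, hya]
    exact fun hx => absurd hx.symm hya

-- ==== loop unrolling: each fueled loop computes the n-th iterate of its step function ====

def pvAnswerA (st : Std.HashSet (Int × Int × Int) × Std.HashSet (Int × Int × Int) × Std.HashSet (Int × Int × Int) ×
    Std.HashSet (Int × Int × Int) × Std.HashSet (Int × Int × Int)) : List Int :=
  [(st.2.2.2.1.size : Int) + 1, (st.2.2.2.2.size : Int) + 1]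

theorem pv_toList_nil (s : Std.HashSet (Int × Int × Int)) (hs : ∀ y, y ∉ s) : s.toList = [] := by
  rw [List.eq_nil_iff_forall_not_mem]
  intro y
  rw [Std.HashSet.mem_toList]
  exact hs y

theorem pvStepA_emp (h w : Int) (st : Std.HashSet (Int × Int × Int) × Std.HashSet (Int × Int × Int) ×
    Std.HashSet (Int × Int × Int) × Std.HashSet (Int × Int × Int) × Std.HashSet (Int × Int × Int))
    (h1 : ∀ y, y ∉ st.1) (h2 : ∀ y, y ∉ st.2.1) :
    (∀ y, y ∉ (pvStepA h w st).1) ∧ (∀ y, y ∉ (pvStepA h w st).2.1) ∧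
    (pvStepA h w st).2.2.2.1 = st.2.2.2.1 ∧ (pvStepA h w st).2.2.2.2 = st.2.2.2.2 := by
  have hlr : ∀ y, y ∉ pvMv h w st.2.2.1 st.1 := fun y hy => by
    obtain ⟨⟨c, hc, _⟩, _⟩ := (pv_mem_pvMv h w _ _ y).1 hy
    exact h1 c hc
  have hle : ∀ y, y ∉ pvMv h w st.2.2.1 st.2.1 := fun y hy => by
    obtain ⟨⟨c, hc, _⟩, _⟩ := (pv_mem_pvMv h w _ _ y).1 hy
    exact h2 c hc
  refine ⟨hlr, hle, ?_, ?_⟩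
  · show pvHsUnion st.2.2.2.1 (pvHsDiff (pvHsDiff (pvMv h w st.2.2.1 st.1) (pvMv h w st.2.2.1 st.2.1)) st.2.2.2.2) = st.2.2.2.1
    rw [pvHsUnion, Std.HashSet.fold_eq_foldl_toList, pv_toList_nil]
    · rfl
    · intro y hy
      exact hlr y ((pv_mem_hsDiff _ _ y).1 ((pv_mem_hsDiff _ _ y).1 hy).1).1
  · show pvHsUnion st.2.2.2.2 (pvHsDiff (pvHsDiff (pvMv h w st.2.2.1 st.2.1) (pvMv h w st.2.2.1 st.1)) st.2.2.2.1) = st.2.2.2.2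
    rw [pvHsUnion, Std.HashSet.fold_eq_foldl_toList, pv_toList_nil]
    · rfl
    · intro y hy
      exact hle y ((pv_mem_hsDiff _ _ y).1 ((pv_mem_hsDiff _ _ y).1 hy).1).1

theorem pvIterA_emp (h w : Int) (st : Std.HashSet (Int × Int × Int) × Std.HashSet (Int × Int × Int) ×
    Std.HashSet (Int × Int × Int) × Std.HashSet (Int × Int × Int) × Std.HashSet (Int × Int × Int))
    (h1 : ∀ y, y ∉ st.1) (h2 : ∀ y, y ∉ st.2.1) (k : Nat) :
    (∀ y, y ∉ ((pvStepA h w)^[k] st).1) ∧ (∀ y, y ∉ ((pvStepA h w)^[k] st).2.1) ∧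
    ((pvStepA h w)^[k] st).2.2.2.1 = st.2.2.2.1 ∧ ((pvStepA h w)^[k] st).2.2.2.2 = st.2.2.2.2 := by
  induction k with
  | zero => exact ⟨h1, h2, rfl, rfl⟩
  | succ k ih =>
    obtain ⟨ih1, ih2, ih3, ih4⟩ := ih
    obtain ⟨e1, e2, e3, e4⟩ := pvStepA_emp h w _ ih1 ih2
    rw [Function.iterate_succ_apply']
    exact ⟨e1, e2, e3.trans ih3, e4.trans ih4⟩

theorem pvLoopA_eq (h w : Int) (fuel : Nat) (st : Std.HashSet (Int × Int × Int) × Std.HashSet (Int × Int × Int) ×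
    Std.HashSet (Int × Int × Int) × Std.HashSet (Int × Int × Int) × Std.HashSet (Int × Int × Int)) :
    pvLoopA h w fuel st = pvAnswerA ((pvStepA h w)^[fuel] st) := by
  induction fuel generalizing st with
  | zero =>
    by_cases hc : st.1.isEmpty ∧ st.2.1.isEmpty <;> simp [pvLoopA, hc, pvAnswerA]
  | succ f ih =>
    by_cases hc : st.1.isEmpty ∧ st.2.1.isEmpty
    · obtain ⟨_, _, e3, e4⟩ := pvIterA_emp h w st
        (Std.HashSet.isEmpty_iff_forall_not_mem.1 hc.1)
        (Std.HashSet.isEmpty_iff_forall_not_mem.1 hc.2) (f + 1)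
      have : pvLoopA h w (f + 1) st = pvAnswerA st := by simp [pvLoopA, hc, pvAnswerA]
      rw [this]
      show pvAnswerA st = _
      rw [pvAnswerA, pvAnswerA, e3, e4]
    · have : pvLoopA h w (f + 1) st = pvLoopA h w f (pvStepA h w st) := by
        simp [pvLoopA, hc]
      rw [this, ih, Function.iterate_succ_apply]

theorem pvStepB_emp (h w : Int)
    (st : Std.HashMap (Int × Int × Int) Int × Std.HashSet (Int × Int × Int) ×
          Std.HashSet (Int × Int × Int) × Int)
    (hf : ∀ y, y ∉ st.2.2.1) : (pvStepB h w st).1 = st.1 ∧ (∀ y, y ∉ (pvStepB h w st).2.2.1) := by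
  have hr : ∀ y, y ∉ Std.HashSet.fold (fun n c => pvHsUpdate n (pvNbrs h w c))
      (∅ : Std.HashSet (Int × Int × Int)) st.2.2.1 := by
    intro y hy
    rw [Std.HashSet.fold_eq_foldl_toList, pv_toList_nil st.2.2.1 hf] at hy
    exact Std.HashSet.not_mem_empty hy
  have hfr : ∀ y, y ∉ (pvStepB h w st).2.2.1 := by
    intro y hy
    exact hr y ((pv_mem_hsDiff _ _ y).1 hy).1
  constructor
  · show Std.HashSet.fold (fun dd c => dd.insert c (st.2.2.2 + 1)) st.1 (pvStepB h w st).2.2.1 = st.1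
    rw [Std.HashSet.fold_eq_foldl_toList, pv_toList_nil _ hfr]
    rfl
  · exact hfr

theorem pvIterB_emp (h w : Int)
    (st : Std.HashMap (Int × Int × Int) Int × Std.HashSet (Int × Int × Int) ×
          Std.HashSet (Int × Int × Int) × Int)
    (hf : ∀ y, y ∉ st.2.2.1) (k : Nat) :
    ((pvStepB h w)^[k] st).1 = st.1 ∧ (∀ y, y ∉ ((pvStepB h w)^[k] st).2.2.1) := by
  induction k with
  | zero => exact ⟨rfl, hf⟩
  | succ k ih =>
    obtain ⟨ih1, ih2⟩ := ih
    obtain ⟨e1, e2⟩ := pvStepB_emp h w _ ih2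
    rw [Function.iterate_succ_apply']
    exact ⟨e1.trans ih1, e2⟩

theorem pvBfsLoop_eq (h w : Int) (fuel : Nat)
    (st : Std.HashMap (Int × Int × Int) Int × Std.HashSet (Int × Int × Int) ×
          Std.HashSet (Int × Int × Int) × Int) :
    pvBfsLoop h w fuel st = ((pvStepB h w)^[fuel] st).1 := by
  induction fuel generalizing st with
  | zero =>
    by_cases hc : st.2.2.1.isEmpty <;> simp [pvBfsLoop, hc]
  | succ f ih =>
    by_cases hc : st.2.2.1.isEmpty
    · rw [(pvIterB_emp h w st (Std.HashSet.isEmpty_iff_forall_not_mem.1 hc) (f + 1)).1]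
      simp [pvBfsLoop, hc]
    · have : pvBfsLoop h w (f + 1) st = pvBfsLoop h w f (pvStepB h w st) := by
        simp [pvBfsLoop, hc]
      rw [this, ih, Function.iterate_succ_apply]

-- ==== the round-indexed state sequences of both programs ====

def pvItB (h w : Int) (W : Std.HashSet (Int × Int × Int)) (src : Int × Int × Int) (n : Nat) :
    Std.HashMap (Int × Int × Int) Int × Std.HashSet (Int × Int × Int) ×
    Std.HashSet (Int × Int × Int) × Int :=
  (pvStepB h w)^[n] ((∅ : Std.HashMap (Int × Int × Int) Int).insert src 0, W, Std.HashSet.ofList [src], 0)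

def pvItA (h w : Int) (r e : Int × Int × Int) (bs : Std.HashSet (Int × Int × Int)) (n : Nat) :
    Std.HashSet (Int × Int × Int) × Std.HashSet (Int × Int × Int) × Std.HashSet (Int × Int × Int) ×
    Std.HashSet (Int × Int × Int) × Std.HashSet (Int × Int × Int) :=
  (pvStepA h w)^[n] (Std.HashSet.ofList [r], Std.HashSet.ofList [e],
    pvHsUnion (Std.HashSet.ofList [r, e]) bs, ∅, ∅)

def pvW (r e : Int × Int × Int) (bs : Std.HashSet (Int × Int × Int)) : Std.HashSet (Int × Int × Int) :=
  pvHsUnion bs (Std.HashSet.ofList [r, e])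

theorem pvItB_succ (h w : Int) (W : Std.HashSet (Int × Int × Int)) (src : Int × Int × Int) (n : Nat) :
    pvItB h w W src (n + 1) = pvStepB h w (pvItB h w W src n) :=
  Function.iterate_succ_apply' _ _ _

theorem pvItA_succ (h w : Int) (r e : Int × Int × Int) (bs : Std.HashSet (Int × Int × Int)) (n : Nat) :
    pvItA h w r e bs (n + 1) = pvStepA h w (pvItA h w r e bs n) :=
  Function.iterate_succ_apply' _ _ _

-- ==== B-side BFS facts ====

theorem pvCnt (h w : Int) (W : Std.HashSet (Int × Int × Int)) (src : Int × Int × Int) (n : Nat) :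
    (pvItB h w W src n).2.2.2 = (n : Int) := by
  induction n with
  | zero => rfl
  | succ n ih =>
    rw [pvItB_succ]
    show (pvItB h w W src n).2.2.2 + 1 = ((n : Int) + 1)
    rw [ih]

theorem pvFB_succ (h w : Int) (W : Std.HashSet (Int × Int × Int)) (src : Int × Int × Int) (n : Nat)
    (y : Int × Int × Int) :
    y ∈ (pvItB h w W src (n + 1)).2.2.1 ↔
      (∃ c ∈ (pvItB h w W src n).2.2.1, y ∈ pvNbrs h w c) ∧ y ∉ (pvItB h w W src n).2.1 := by
  rw [pvItB_succ]
  show y ∈ pvHsDiff (Std.HashSet.fold (fun n c => pvHsUpdate n (pvNbrs h w c))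
      (∅ : Std.HashSet (Int × Int × Int)) (pvItB h w W src n).2.2.1) (pvItB h w W src n).2.1 ↔ _
  rw [pv_mem_hsDiff]
  have : ∀ (l : List (Int × Int × Int)) (init : Std.HashSet (Int × Int × Int)),
      y ∈ l.foldl (fun n c => pvHsUpdate n (pvNbrs h w c)) init ↔
        y ∈ init ∨ ∃ c ∈ l, y ∈ pvNbrs h w c := by
    intro l
    induction l with
    | nil => simp
    | cons a t ih =>
      intro init
      rw [List.foldl_cons, ih, pv_mem_hsUpdate]
      simp only [List.mem_cons]
      constructor
      · rintro ((hy | hy) | ⟨c, hc, hy⟩)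
        · exact Or.inl hy
        · exact Or.inr ⟨a, Or.inl rfl, hy⟩
        · exact Or.inr ⟨c, Or.inr hc, hy⟩
      · rintro (hy | ⟨c, (rfl | hc), hy⟩)
        · exact Or.inl (Or.inl hy)
        · exact Or.inl (Or.inr hy)
        · exact Or.inr ⟨c, hc, hy⟩
  rw [Std.HashSet.fold_eq_foldl_toList, this]
  simp only [Std.HashSet.not_mem_empty, false_or, Std.HashSet.mem_toList]

theorem pvSB_succ (h w : Int) (W : Std.HashSet (Int × Int × Int)) (src : Int × Int × Int) (n : Nat)
    (y : Int × Int × Int) :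
    y ∈ (pvItB h w W src (n + 1)).2.1 ↔ y ∈ (pvItB h w W src n).2.1 ∨ y ∈ (pvItB h w W src (n + 1)).2.2.1 := by
  rw [pvItB_succ]
  show y ∈ pvHsUnion (pvItB h w W src n).2.1 ((pvStepB h w (pvItB h w W src n)).2.2.1) ↔ _
  rw [pv_mem_hsUnion]

theorem pvSB_zero (h w : Int) (W : Std.HashSet (Int × Int × Int)) (src : Int × Int × Int) :
    (pvItB h w W src 0).2.1 = W := rfl

theorem pvFB_zero (h w : Int) (W : Std.HashSet (Int × Int × Int)) (src : Int × Int × Int) :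
    (pvItB h w W src 0).2.2.1 = Std.HashSet.ofList [src] := rfl

theorem pvSB_mono (h w : Int) (W : Std.HashSet (Int × Int × Int)) (src : Int × Int × Int) {m n : Nat}
    (hmn : m ≤ n) {y : Int × Int × Int} (hy : y ∈ (pvItB h w W src m).2.1) :
    y ∈ (pvItB h w W src n).2.1 := by
  induction n, hmn using Nat.le_induction with
  | base => exact hy
  | succ n hmn ih => exact (pvSB_succ h w W src n y).2 (Or.inl ih)

theorem pvSB_W_sub (h w : Int) (W : Std.HashSet (Int × Int × Int)) (src : Int × Int × Int) (n : Nat)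
    {y : Int × Int × Int} (hy : y ∈ W) : y ∈ (pvItB h w W src n).2.1 :=
  pvSB_mono h w W src (Nat.zero_le n) hy

theorem pvFB_sub (h w : Int) (W : Std.HashSet (Int × Int × Int)) (src : Int × Int × Int)
    (hsrc : src ∈ W) (n : Nat) {y : Int × Int × Int} (hy : y ∈ (pvItB h w W src n).2.2.1) :
    y ∈ (pvItB h w W src n).2.1 := by
  cases n with
  | zero =>
    rw [pvFB_zero, Std.HashSet.mem_ofList] at hy
    simp only [List.contains_eq_mem, List.mem_singleton, decide_eq_true_eq] at hy
    subst hy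
    exact hsrc
  | succ n => exact (pvSB_succ h w W src n y).2 (Or.inr hy)

theorem pvFB_disj (h w : Int) (W : Std.HashSet (Int × Int × Int)) (src : Int × Int × Int) (n : Nat)
    {y : Int × Int × Int} (hy : y ∈ (pvItB h w W src (n + 1)).2.2.1) :
    y ∉ (pvItB h w W src n).2.1 :=
  ((pvFB_succ h w W src n y).1 hy).2

theorem pvSB_layers (h w : Int) (W : Std.HashSet (Int × Int × Int)) (src : Int × Int × Int) (n : Nat)
    (y : Int × Int × Int) :
    y ∈ (pvItB h w W src n).2.1 ↔ y ∈ W ∨ ∃ k, 1 ≤ k ∧ k ≤ n ∧ y ∈ (pvItB h w W src k).2.2.1 := by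
  induction n with
  | zero =>
    rw [pvSB_zero]
    constructor
    · exact fun hy => Or.inl hy
    · rintro (hy | ⟨k, hk1, hk0, _⟩)
      · exact hy
      · omega
  | succ n ih =>
    rw [pvSB_succ, ih]
    constructor
    · rintro ((hy | ⟨k, hk1, hkn, hy⟩) | hy)
      · exact Or.inl hy
      · exact Or.inr ⟨k, hk1, by omega, hy⟩
      · exact Or.inr ⟨n + 1, by omega, le_refl _, hy⟩
    · rintro (hy | ⟨k, hk1, hkn, hy⟩)
      · exact Or.inl (Or.inl hy)
      · rcases Nat.lt_or_ge k (n + 1) with hlt | hge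
        · exact Or.inl (Or.inr ⟨k, hk1, by omega, hy⟩)
        · have : k = n + 1 := by omega
          subst this
          exact Or.inr hy

theorem pvAbsorb (h w : Int) (W : Std.HashSet (Int × Int × Int)) (src : Int × Int × Int)
    (hsrc : src ∈ W) (n : Nat) {c y : Int × Int × Int}
    (hc : c ∈ (pvItB h w W src n).2.1) (hcW : c ∉ W) (hy : y ∈ pvNbrs h w c) :
    y ∈ (pvItB h w W src (n + 1)).2.1 := by
  obtain hW | ⟨k, hk1, hkn, hk⟩ := (pvSB_layers h w W src n c).1 hc
  · exact absurd hW hcW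
  · by_cases hys : y ∈ (pvItB h w W src k).2.1
    · exact pvSB_mono h w W src (by omega) hys
    · have : y ∈ (pvItB h w W src (k + 1)).2.2.1 :=
        (pvFB_succ h w W src k y).2 ⟨⟨c, hk, hy⟩, hys⟩
      exact pvSB_mono h w W src (by omega) (pvFB_sub h w W src hsrc (k + 1) this)

theorem pvDB_zero (h w : Int) (W : Std.HashSet (Int × Int × Int)) (src : Int × Int × Int)
    (y : Int × Int × Int) :
    (pvItB h w W src 0).1[y]? = if y = src then some (0 : Int) else none := by
  show ((∅ : Std.HashMap (Int × Int × Int) Int).insert src 0)[y]? = _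
  rw [Std.HashMap.getElem?_insert]
  by_cases hy : y = src <;> simp [hy, beq_iff_eq]
  exact fun hx => absurd hx.symm hy

theorem pvDB_succ_mem (h w : Int) (W : Std.HashSet (Int × Int × Int)) (src : Int × Int × Int) (n : Nat)
    {y : Int × Int × Int} (hy : y ∈ (pvItB h w W src (n + 1)).2.2.1) :
    (pvItB h w W src (n + 1)).1[y]? = some ((n : Int) + 1) := by
  conv_lhs => rw [pvItB_succ]
  have hd : (pvStepB h w (pvItB h w W src n)).1 =
      Std.HashSet.fold (fun dd c => dd.insert c ((pvItB h w W src n).2.2.2 + 1))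
        (pvItB h w W src n).1 ((pvStepB h w (pvItB h w W src n)).2.2.1) := rfl
  rw [hd, pvCnt, Std.HashSet.fold_eq_foldl_toList, pv_get?_foldl_insert_const, if_pos]
  rw [Std.HashSet.mem_toList, ← pvItB_succ]
  exact hy

theorem pvDB_succ_not (h w : Int) (W : Std.HashSet (Int × Int × Int)) (src : Int × Int × Int) (n : Nat)
    {y : Int × Int × Int} (hy : y ∉ (pvItB h w W src (n + 1)).2.2.1) :
    (pvItB h w W src (n + 1)).1[y]? = (pvItB h w W src n).1[y]? := by
  conv_lhs => rw [pvItB_succ]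
  have hd : (pvStepB h w (pvItB h w W src n)).1 =
      Std.HashSet.fold (fun dd c => dd.insert c ((pvItB h w W src n).2.2.2 + 1))
        (pvItB h w W src n).1 ((pvStepB h w (pvItB h w W src n)).2.2.1) := rfl
  rw [hd, Std.HashSet.fold_eq_foldl_toList, pv_get?_foldl_insert_const, if_neg]
  rw [Std.HashSet.mem_toList, ← pvItB_succ]
  exact hy

theorem pvDB_char (h w : Int) (W : Std.HashSet (Int × Int × Int)) (src : Int × Int × Int)
    (hsrc : src ∈ W) (n : Nat) (y : Int × Int × Int) (m : Int) :
    (pvItB h w W src n).1[y]? = some m ↔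
      ((y = src ∧ m = 0) ∨ ∃ k, 1 ≤ k ∧ k ≤ n ∧ m = (k : Int) ∧ y ∈ (pvItB h w W src k).2.2.1) := by
  induction n with
  | zero =>
    rw [pvDB_zero]
    by_cases hy : y = src
    · rw [if_pos hy]
      constructor
      · intro hm
        injection hm with hm
        exact Or.inl ⟨hy, hm.symm⟩
      · rintro (⟨_, hm⟩ | ⟨k, hk1, hk0, _, _⟩)
        · rw [hm]
        · omega
    · rw [if_neg hy]
      constructor
      · intro hm
        cases hm
      · rintro (⟨h1, _⟩ | ⟨k, hk1, hk0, _, _⟩)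
        · exact absurd h1 hy
        · omega
  | succ n ih =>
    by_cases hy : y ∈ (pvItB h w W src (n + 1)).2.2.1
    · rw [pvDB_succ_mem h w W src n hy]
      constructor
      · intro hm
        injection hm with hm
        exact Or.inr ⟨n + 1, by omega, le_refl _, by push_cast; omega, hy⟩
      · rintro (⟨hys, _⟩ | ⟨k, hk1, hkn, hmk, hk⟩)
        · rw [hys] at hy
          exact absurd (pvSB_W_sub h w W src n hsrc) (pvFB_disj h w W src n hy)
        · rcases Nat.lt_or_ge k (n + 1) with hlt | hge
          · have : y ∈ (pvItB h w W src n).2.1 :=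
              pvSB_mono h w W src (by omega) (pvFB_sub h w W src hsrc k hk)
            exact absurd this (pvFB_disj h w W src n hy)
          · have : k = n + 1 := by omega
            subst this
            subst hmk
            push_cast
            rfl
    · rw [pvDB_succ_not h w W src n hy, ih]
      constructor
      · rintro (h0 | ⟨k, hk1, hkn, hmk, hk⟩)
        · exact Or.inl h0
        · exact Or.inr ⟨k, hk1, by omega, hmk, hk⟩
      · rintro (h0 | ⟨k, hk1, hkn, hmk, hk⟩)
        · exact Or.inl h0
        · rcases Nat.lt_or_ge k (n + 1) with hlt | hge
          · exact Or.inr ⟨k, hk1, by omega, hmk, hk⟩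
          · have : k = n + 1 := by omega
            subst this
            exact absurd hk hy

theorem pvDB_mem (h w : Int) (W : Std.HashSet (Int × Int × Int)) (src : Int × Int × Int)
    (hsrc : src ∈ W) (n : Nat) {y : Int × Int × Int} {m : Int}
    (hm : (pvItB h w W src n).1[y]? = some m) :
    y ∈ (pvItB h w W src n).2.1 ∧ m ≤ (n : Int) := by
  obtain ⟨hys, rfl⟩ | ⟨k, hk1, hkn, rfl, hk⟩ := (pvDB_char h w W src hsrc n y m).1 hm
  · rw [hys]
    exact ⟨pvSB_W_sub h w W src n hsrc, by omega⟩
  · exact ⟨pvSB_mono h w W src hkn (pvFB_sub h w W src hsrc k hk), by exact_mod_cast hkn⟩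

theorem pvDB_layer (h w : Int) (W : Std.HashSet (Int × Int × Int)) (src : Int × Int × Int)
    (hsrc : src ∈ W) {n k : Nat} (hk1 : 1 ≤ k) (hkn : k ≤ n) {y : Int × Int × Int}
    (hy : y ∈ (pvItB h w W src k).2.2.1) :
    (pvItB h w W src n).1[y]? = some (k : Int) :=
  (pvDB_char h w W src hsrc n y k).2 (Or.inr ⟨k, hk1, hkn, rfl, hy⟩)

theorem pvDB_fresh (h w : Int) (W : Std.HashSet (Int × Int × Int)) (src : Int × Int × Int)
    (hsrc : src ∈ W) (n : Nat) {y : Int × Int × Int}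
    (hy : y ∈ (pvItB h w W src (n + 1)).2.2.1) :
    (pvItB h w W src n).1[y]? = none := by
  cases hg : (pvItB h w W src n).1[y]? with
  | none => rfl
  | some m => exact absurd (pvDB_mem h w W src hsrc n hg).1 (pvFB_disj h w W src n hy)

theorem pvDB_pos_iff (h w : Int) (W : Std.HashSet (Int × Int × Int)) (src : Int × Int × Int)
    (hsrc : src ∈ W) (n : Nat) {y : Int × Int × Int} {m : Int}
    (hm : (pvItB h w W src n).1[y]? = some m) : (1 ≤ m ↔ y ≠ src) := by
  obtain ⟨hys, rfl⟩ | ⟨k, hk1, hkn, rfl, hk⟩ := (pvDB_char h w W src hsrc n y m).1 hm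
  · simp [hys]
  · have hyW : y ∉ (pvItB h w W src (k - 1)).2.1 := by
      have : y ∈ (pvItB h w W src ((k - 1) + 1)).2.2.1 := by
        have hkk : (k - 1) + 1 = k := by omega
        rw [hkk]
        exact hk
      exact pvFB_disj h w W src (k - 1) this
    constructor
    · intro _ hys
      rw [hys] at hyW
      exact hyW (pvSB_W_sub h w W src (k - 1) hsrc)
    · intro _
      exact_mod_cast hk1

-- ==== A-side recurrence facts ====

theorem pvLR_succ (h w : Int) (r e : Int × Int × Int) (bs : Std.HashSet (Int × Int × Int)) (n : Nat)
    (y : Int × Int × Int) :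
    y ∈ (pvItA h w r e bs (n + 1)).1 ↔
      (∃ c ∈ (pvItA h w r e bs n).1, y ∈ pvNbrs h w c) ∧ y ∉ (pvItA h w r e bs n).2.2.1 := by
  rw [pvItA_succ]
  exact pv_mem_pvMv h w _ _ y

theorem pvLE_succ (h w : Int) (r e : Int × Int × Int) (bs : Std.HashSet (Int × Int × Int)) (n : Nat)
    (y : Int × Int × Int) :
    y ∈ (pvItA h w r e bs (n + 1)).2.1 ↔
      (∃ c ∈ (pvItA h w r e bs n).2.1, y ∈ pvNbrs h w c) ∧ y ∉ (pvItA h w r e bs n).2.2.1 := by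
  rw [pvItA_succ]
  exact pv_mem_pvMv h w _ _ y

theorem pvV_succ (h w : Int) (r e : Int × Int × Int) (bs : Std.HashSet (Int × Int × Int)) (n : Nat)
    (y : Int × Int × Int) :
    y ∈ (pvItA h w r e bs (n + 1)).2.2.1 ↔
      y ∈ (pvItA h w r e bs n).2.2.1 ∨ y ∈ (pvItA h w r e bs (n + 1)).1 ∨
        y ∈ (pvItA h w r e bs (n + 1)).2.1 := by
  rw [pvItA_succ]
  show y ∈ pvHsUnion (pvItA h w r e bs n).2.2.1
      (pvHsUnion (pvStepA h w (pvItA h w r e bs n)).1 (pvStepA h w (pvItA h w r e bs n)).2.1) ↔ _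
  rw [pv_mem_hsUnion, pv_mem_hsUnion]

theorem pvCR_succ (h w : Int) (r e : Int × Int × Int) (bs : Std.HashSet (Int × Int × Int)) (n : Nat)
    (y : Int × Int × Int) :
    y ∈ (pvItA h w r e bs (n + 1)).2.2.2.1 ↔
      y ∈ (pvItA h w r e bs n).2.2.2.1 ∨
        (y ∈ (pvItA h w r e bs (n + 1)).1 ∧ y ∉ (pvItA h w r e bs (n + 1)).2.1 ∧
          y ∉ (pvItA h w r e bs n).2.2.2.2) := by
  rw [pvItA_succ]
  show y ∈ pvHsUnion (pvItA h w r e bs n).2.2.2.1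
      (pvHsDiff (pvHsDiff (pvStepA h w (pvItA h w r e bs n)).1
        (pvStepA h w (pvItA h w r e bs n)).2.1) (pvItA h w r e bs n).2.2.2.2) ↔ _
  rw [pv_mem_hsUnion, pv_mem_hsDiff, pv_mem_hsDiff]
  tauto

theorem pvCE_succ (h w : Int) (r e : Int × Int × Int) (bs : Std.HashSet (Int × Int × Int)) (n : Nat)
    (y : Int × Int × Int) :
    y ∈ (pvItA h w r e bs (n + 1)).2.2.2.2 ↔
      y ∈ (pvItA h w r e bs n).2.2.2.2 ∨
        (y ∈ (pvItA h w r e bs (n + 1)).2.1 ∧ y ∉ (pvItA h w r e bs (n + 1)).1 ∧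
          y ∉ (pvItA h w r e bs n).2.2.2.1) := by
  rw [pvItA_succ]
  show y ∈ pvHsUnion (pvItA h w r e bs n).2.2.2.2
      (pvHsDiff (pvHsDiff (pvStepA h w (pvItA h w r e bs n)).2.1
        (pvStepA h w (pvItA h w r e bs n)).1) (pvItA h w r e bs n).2.2.2.1) ↔ _
  rw [pv_mem_hsUnion, pv_mem_hsDiff, pv_mem_hsDiff]
  tauto

-- ==== the two purely propositional step lemmas of the simulation argument ====

theorem pv_rel_step {α : Type} (nbrs : α → List α) (L1 L2 V1 FR1 FR2 SR0 SR1 SE0 SE1 W : α → Prop)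
    (hL2 : ∀ y, L2 y ↔ (∃ c, L1 c ∧ y ∈ nbrs c) ∧ ¬ V1 y)
    (hFR2 : ∀ y, FR2 y ↔ (∃ c, FR1 c ∧ y ∈ nbrs c) ∧ ¬ SR1 y)
    (hV1 : ∀ y, V1 y ↔ SR1 y ∨ SE1 y)
    (hL1 : ∀ y, L1 y ↔ FR1 y ∧ ¬ SE0 y)
    (hdisj : ∀ y, FR1 y → ¬ SR0 y)
    (hW : ∀ y, W y → SR0 y)
    (habs : ∀ c, SE0 c → ¬ W c → ∀ y ∈ nbrs c, SE1 y) :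
    ∀ y, L2 y ↔ FR2 y ∧ ¬ SE1 y := by
  intro y
  constructor
  · intro hy2
    obtain ⟨⟨c, hc, hy⟩, hnv⟩ := (hL2 y).1 hy2
    have hns : ¬ SR1 y := fun hx => hnv ((hV1 y).2 (Or.inl hx))
    have hne : ¬ SE1 y := fun hx => hnv ((hV1 y).2 (Or.inr hx))
    exact ⟨(hFR2 y).2 ⟨⟨c, ((hL1 c).1 hc).1, hy⟩, hns⟩, hne⟩
  · rintro ⟨hfr2, hnse⟩
    obtain ⟨⟨c, hc, hy⟩, hns⟩ := (hFR2 y).1 hfr2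
    by_cases hcse : SE0 c
    · exact absurd (habs c hcse (fun hw => hdisj c hc (hW c hw)) y hy) hnse
    · exact (hL2 y).2 ⟨⟨c, (hL1 c).2 ⟨hc, hcse⟩, hy⟩,
        fun hv => ((hV1 y).1 hv).elim hns hnse⟩

theorem pv_count_step {α : Type} (n : Nat)
    (CR0 CR1 L1 M1 CE0 FR1 FE1 SR0 SE0 : α → Prop)
    (DR0 DR1 DE0 DE1 : α → Option Int)
    (hCR1 : ∀ y, CR1 y ↔ CR0 y ∨ (L1 y ∧ ¬ M1 y ∧ ¬ CE0 y))
    (hL1 : ∀ y, L1 y ↔ FR1 y ∧ ¬ SE0 y)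
    (hM1 : ∀ y, M1 y ↔ FE1 y ∧ ¬ SR0 y)
    (hdisjR : ∀ y, FR1 y → ¬ SR0 y)
    (hDR1s : ∀ y, FR1 y → DR1 y = some ((n : Int) + 1))
    (hDR1o : ∀ y, ¬ FR1 y → DR1 y = DR0 y)
    (hDE1s : ∀ y, FE1 y → DE1 y = some ((n : Int) + 1))
    (hDE1o : ∀ y, ¬ FE1 y → DE1 y = DE0 y)
    (hDR0mem : ∀ y m, DR0 y = some m → SR0 y ∧ m ≤ (n : Int))
    (hDE0mem : ∀ y m, DE0 y = some m → SE0 y)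
    (hSEdict : ∀ y, SE0 y → ¬ SR0 y → ∃ m', DE0 y = some m' ∧ m' ≤ (n : Int))
    (hFE1fresh : ∀ y, FE1 y → DE0 y = none)
    (hCE0 : ∀ y, CE0 y → SE0 y)
    (hQ0 : ∀ y, CR0 y ↔ ∃ m, DR0 y = some m ∧ 1 ≤ m ∧ ∀ m', DE0 y = some m' → m < m') :
    ∀ y, CR1 y ↔ ∃ m, DR1 y = some m ∧ 1 ≤ m ∧ ∀ m', DE1 y = some m' → m < m' := by
  intro y
  rw [hCR1 y]
  by_cases hyF : FR1 y
  · have hySR : ¬ SR0 y := hdisjR y hyF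
    have hDR0none : DR0 y = none := by
      cases hg : DR0 y with
      | none => rfl
      | some m => exact absurd (hDR0mem y m hg).1 hySR
    have hnCR0 : ¬ CR0 y := fun hx => by
      obtain ⟨m, hm, _⟩ := (hQ0 y).1 hx
      rw [hDR0none] at hm
      cases hm
    by_cases hyE : FE1 y
    · -- tie cell: claimed by neither, and the strict comparison fails too
      constructor
      · rintro (hx | ⟨_, hM, _⟩)
        · exact absurd hx hnCR0
        · exact absurd ((hM1 y).2 ⟨hyE, hySR⟩) hM
      · rintro ⟨m, hm, _, hall⟩
        rw [hDR1s y hyF] at hm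
        injection hm with hm
        have := hall ((n : Int) + 1) (hDE1s y hyE)
        omega
    · by_cases hySE : SE0 y
      · -- already reached strictly earlier by the other source
        constructor
        · rintro (hx | ⟨hLy, _, _⟩)
          · exact absurd hx hnCR0
          · exact absurd hySE ((hL1 y).1 hLy).2
        · rintro ⟨m, hm, _, hall⟩
          rw [hDR1s y hyF] at hm
          injection hm with hm
          obtain ⟨m', hm', hle⟩ := hSEdict y hySE hySR
          have := hall m' (by rw [hDE1o y hyE]; exact hm')
          omega
      · -- newly claimed by this source
        constructor
        · intro _
          refine ⟨(n : Int) + 1, hDR1s y hyF, by omega, ?_⟩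
          intro m' hm'
          rw [hDE1o y hyE] at hm'
          exact absurd (hDE0mem y m' hm') hySE
        · intro _
          exact Or.inr ⟨(hL1 y).2 ⟨hyF, hySE⟩,
            fun hM => hyE ((hM1 y).1 hM).1,
            fun hc => hySE (hCE0 y hc)⟩
  · have hnL : ¬ L1 y := fun hx => hyF ((hL1 y).1 hx).1
    rw [hDR1o y hyF]
    constructor
    · rintro (hx | ⟨hLy, _, _⟩)
      · obtain ⟨m, hm, h1, hall⟩ := (hQ0 y).1 hx
        refine ⟨m, hm, h1, ?_⟩
        intro m' hm'
        by_cases hyE : FE1 y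
        · rw [hDE1s y hyE] at hm'
          injection hm' with hm'
          have := (hDR0mem y m hm).2
          omega
        · rw [hDE1o y hyE] at hm'
          exact hall m' hm'
      · exact absurd hLy hnL
    · rintro ⟨m, hm, h1, hall⟩
      refine Or.inl ((hQ0 y).2 ⟨m, hm, h1, ?_⟩)
      intro m' hm'
      by_cases hyE : FE1 y
      · rw [hFE1fresh y hyE] at hm'
        cases hm'
      · exact hall m' (by rw [hDE1o y hyE]; exact hm')

-- ==== the coupled invariant: A's race state, round by round, in terms of B's two BFS states ====

theorem pvW_mem_r (r e : Int × Int × Int) (bs : Std.HashSet (Int × Int × Int)) : r ∈ pvW r e bs := by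
  rw [pvW, pv_mem_hsUnion, Std.HashSet.mem_ofList]
  simp

theorem pvW_mem_e (r e : Int × Int × Int) (bs : Std.HashSet (Int × Int × Int)) : e ∈ pvW r e bs := by
  rw [pvW, pv_mem_hsUnion, Std.HashSet.mem_ofList]
  simp

set_option maxHeartbeats 1000000 in
theorem pvINV (h w : Int) (r e : Int × Int × Int) (bs : Std.HashSet (Int × Int × Int)) (n : Nat) :
    (∀ y, y ∈ (pvItA h w r e bs n).2.2.1 ↔
        y ∈ (pvItB h w (pvW r e bs) r n).2.1 ∨ y ∈ (pvItB h w (pvW r e bs) e n).2.1)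
  ∧ (∀ y, y ∈ (pvItA h w r e bs (n + 1)).1 ↔
        y ∈ (pvItB h w (pvW r e bs) r (n + 1)).2.2.1 ∧ ¬ y ∈ (pvItB h w (pvW r e bs) e n).2.1)
  ∧ (∀ y, y ∈ (pvItA h w r e bs (n + 1)).2.1 ↔
        y ∈ (pvItB h w (pvW r e bs) e (n + 1)).2.2.1 ∧ ¬ y ∈ (pvItB h w (pvW r e bs) r n).2.1)
  ∧ (∀ y, y ∈ (pvItA h w r e bs n).2.2.2.1 ↔
        ∃ m, (pvItB h w (pvW r e bs) r n).1[y]? = some m ∧ 1 ≤ m ∧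
          ∀ m', (pvItB h w (pvW r e bs) e n).1[y]? = some m' → m < m')
  ∧ (∀ y, y ∈ (pvItA h w r e bs n).2.2.2.2 ↔
        ∃ m, (pvItB h w (pvW r e bs) e n).1[y]? = some m ∧ 1 ≤ m ∧
          ∀ m', (pvItB h w (pvW r e bs) r n).1[y]? = some m' → m < m') := by
  induction n with
  | zero =>
    have hbase : ∀ y, y ∈ (pvItA h w r e bs 0).2.2.1 ↔ y ∈ pvW r e bs := by
      intro y
      show y ∈ pvHsUnion (Std.HashSet.ofList [r, e]) bs ↔ _
      rw [pvW, pv_mem_hsUnion, pv_mem_hsUnion]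
      tauto
    refine ⟨?_, ?_, ?_, ?_, ?_⟩
    · intro y
      rw [hbase y, pvSB_zero, pvSB_zero]
      tauto
    · intro y
      rw [pvLR_succ, pvFB_succ, pvSB_zero, pvFB_zero, pvSB_zero, hbase y]
      show (∃ c ∈ (Std.HashSet.ofList [r] : Std.HashSet (Int × Int × Int)), y ∈ pvNbrs h w c) ∧ _ ↔ _
      tauto
    · intro y
      rw [pvLE_succ, pvFB_succ, pvSB_zero, pvFB_zero, pvSB_zero, hbase y]
      show (∃ c ∈ (Std.HashSet.ofList [e] : Std.HashSet (Int × Int × Int)), y ∈ pvNbrs h w c) ∧ _ ↔ _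
      tauto
    · intro y
      constructor
      · intro hy
        exact absurd hy (Std.HashSet.not_mem_empty)
      · rintro ⟨m, hm, h1, _⟩
        rw [pvDB_zero] at hm
        by_cases hys : y = r
        · rw [if_pos hys] at hm
          injection hm with hm
          omega
        · rw [if_neg hys] at hm
          cases hm
    · intro y
      constructor
      · intro hy
        exact absurd hy (Std.HashSet.not_mem_empty)
      · rintro ⟨m, hm, h1, _⟩
        rw [pvDB_zero] at hm
        by_cases hys : y = e
        · rw [if_pos hys] at hm
          injection hm with hm
          omega
        · rw [if_neg hys] at hm
          cases hm
  | succ n ih =>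
    obtain ⟨ih1, ih2, ih3, ih4, ih5⟩ := ih
    have hWr : r ∈ pvW r e bs := pvW_mem_r r e bs
    have hWe : e ∈ pvW r e bs := pvW_mem_e r e bs
    have i1 : ∀ y, y ∈ (pvItA h w r e bs (n + 1)).2.2.1 ↔
        y ∈ (pvItB h w (pvW r e bs) r (n + 1)).2.1 ∨ y ∈ (pvItB h w (pvW r e bs) e (n + 1)).2.1 := by
      intro y
      rw [pvV_succ, pvSB_succ, pvSB_succ]
      constructor
      · rintro (hv | hlr | hle)
        · rcases (ih1 y).1 hv with hx | hx
          · exact Or.inl (Or.inl hx)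
          · exact Or.inr (Or.inl hx)
        · exact Or.inl (Or.inr ((ih2 y).1 hlr).1)
        · exact Or.inr (Or.inr ((ih3 y).1 hle).1)
      · intro hv
        by_cases hr1 : y ∈ (pvItB h w (pvW r e bs) r (n + 1)).2.2.1
        · by_cases hse : y ∈ (pvItB h w (pvW r e bs) e n).2.1
          · exact Or.inl ((ih1 y).2 (Or.inr hse))
          · exact Or.inr (Or.inl ((ih2 y).2 ⟨hr1, hse⟩))
        · by_cases he1 : y ∈ (pvItB h w (pvW r e bs) e (n + 1)).2.2.1
          · by_cases hsr : y ∈ (pvItB h w (pvW r e bs) r n).2.1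
            · exact Or.inl ((ih1 y).2 (Or.inl hsr))
            · exact Or.inr (Or.inr ((ih3 y).2 ⟨he1, hsr⟩))
          · rcases hv with (hx | hx) | (hx | hx)
            · exact Or.inl ((ih1 y).2 (Or.inl hx))
            · exact absurd hx hr1
            · exact Or.inl ((ih1 y).2 (Or.inr hx))
            · exact absurd hx he1
    refine ⟨i1, ?_, ?_, ?_, ?_⟩
    · exact pv_rel_step (pvNbrs h w)
        (· ∈ (pvItA h w r e bs (n + 1)).1) (· ∈ (pvItA h w r e bs (n + 2)).1)
        (· ∈ (pvItA h w r e bs (n + 1)).2.2.1)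
        (· ∈ (pvItB h w (pvW r e bs) r (n + 1)).2.2.1) (· ∈ (pvItB h w (pvW r e bs) r (n + 2)).2.2.1)
        (· ∈ (pvItB h w (pvW r e bs) r n).2.1) (· ∈ (pvItB h w (pvW r e bs) r (n + 1)).2.1)
        (· ∈ (pvItB h w (pvW r e bs) e n).2.1) (· ∈ (pvItB h w (pvW r e bs) e (n + 1)).2.1)
        (· ∈ pvW r e bs)
        (pvLR_succ h w r e bs (n + 1))
        (pvFB_succ h w (pvW r e bs) r (n + 1))
        i1
        ih2
        (fun y hy => pvFB_disj h w (pvW r e bs) r n hy)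
        (fun y hy => pvSB_W_sub h w (pvW r e bs) r n hy)
        (fun c hc hcW y hy => pvAbsorb h w (pvW r e bs) e hWe n hc hcW hy)
    · exact pv_rel_step (pvNbrs h w)
        (· ∈ (pvItA h w r e bs (n + 1)).2.1) (· ∈ (pvItA h w r e bs (n + 2)).2.1)
        (· ∈ (pvItA h w r e bs (n + 1)).2.2.1)
        (· ∈ (pvItB h w (pvW r e bs) e (n + 1)).2.2.1) (· ∈ (pvItB h w (pvW r e bs) e (n + 2)).2.2.1)
        (· ∈ (pvItB h w (pvW r e bs) e n).2.1) (· ∈ (pvItB h w (pvW r e bs) e (n + 1)).2.1)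
        (· ∈ (pvItB h w (pvW r e bs) r n).2.1) (· ∈ (pvItB h w (pvW r e bs) r (n + 1)).2.1)
        (· ∈ pvW r e bs)
        (pvLE_succ h w r e bs (n + 1))
        (pvFB_succ h w (pvW r e bs) e (n + 1))
        (fun y => by
          show y ∈ (pvItA h w r e bs (n + 1)).2.2.1 ↔
            y ∈ (pvItB h w (pvW r e bs) e (n + 1)).2.1 ∨ y ∈ (pvItB h w (pvW r e bs) r (n + 1)).2.1
          exact (i1 y).trans or_comm)
        ih3
        (fun y hy => pvFB_disj h w (pvW r e bs) e n hy)
        (fun y hy => pvSB_W_sub h w (pvW r e bs) e n hy)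
        (fun c hc hcW y hy => pvAbsorb h w (pvW r e bs) r hWr n hc hcW hy)
    · exact pv_count_step n
        (· ∈ (pvItA h w r e bs n).2.2.2.1) (· ∈ (pvItA h w r e bs (n + 1)).2.2.2.1)
        (· ∈ (pvItA h w r e bs (n + 1)).1) (· ∈ (pvItA h w r e bs (n + 1)).2.1)
        (· ∈ (pvItA h w r e bs n).2.2.2.2)
        (· ∈ (pvItB h w (pvW r e bs) r (n + 1)).2.2.1) (· ∈ (pvItB h w (pvW r e bs) e (n + 1)).2.2.1)
        (· ∈ (pvItB h w (pvW r e bs) r n).2.1) (· ∈ (pvItB h w (pvW r e bs) e n).2.1)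
        (fun y => (pvItB h w (pvW r e bs) r n).1[y]?) (fun y => (pvItB h w (pvW r e bs) r (n + 1)).1[y]?)
        (fun y => (pvItB h w (pvW r e bs) e n).1[y]?) (fun y => (pvItB h w (pvW r e bs) e (n + 1)).1[y]?)
        (pvCR_succ h w r e bs n)
        ih2
        ih3
        (fun y hy => pvFB_disj h w (pvW r e bs) r n hy)
        (fun y hy => pvDB_succ_mem h w (pvW r e bs) r n hy)
        (fun y hy => pvDB_succ_not h w (pvW r e bs) r n hy)
        (fun y hy => pvDB_succ_mem h w (pvW r e bs) e n hy)
        (fun y hy => pvDB_succ_not h w (pvW r e bs) e n hy)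
        (fun y m hm => pvDB_mem h w (pvW r e bs) r hWr n hm)
        (fun y m hm => (pvDB_mem h w (pvW r e bs) e hWe n hm).1)
        (fun y hySE hySR => by
          obtain hW | ⟨k, hk1, hkn, hk⟩ := (pvSB_layers h w (pvW r e bs) e n y).1 hySE
          · exact absurd (pvSB_W_sub h w (pvW r e bs) r n hW) hySR
          · exact ⟨(k : Int), pvDB_layer h w (pvW r e bs) e hWe hk1 hkn hk, by exact_mod_cast hkn⟩)
        (fun y hy => pvDB_fresh h w (pvW r e bs) e hWe n hy)
        (fun y hc => by
          obtain ⟨m, hm, h1, _⟩ := (ih5 y).1 hc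
          exact (pvDB_mem h w (pvW r e bs) e hWe n hm).1)
        ih4
    · exact pv_count_step n
        (· ∈ (pvItA h w r e bs n).2.2.2.2) (· ∈ (pvItA h w r e bs (n + 1)).2.2.2.2)
        (· ∈ (pvItA h w r e bs (n + 1)).2.1) (· ∈ (pvItA h w r e bs (n + 1)).1)
        (· ∈ (pvItA h w r e bs n).2.2.2.1)
        (· ∈ (pvItB h w (pvW r e bs) e (n + 1)).2.2.1) (· ∈ (pvItB h w (pvW r e bs) r (n + 1)).2.2.1)
        (· ∈ (pvItB h w (pvW r e bs) e n).2.1) (· ∈ (pvItB h w (pvW r e bs) r n).2.1)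
        (fun y => (pvItB h w (pvW r e bs) e n).1[y]?) (fun y => (pvItB h w (pvW r e bs) e (n + 1)).1[y]?)
        (fun y => (pvItB h w (pvW r e bs) r n).1[y]?) (fun y => (pvItB h w (pvW r e bs) r (n + 1)).1[y]?)
        (pvCE_succ h w r e bs n)
        ih3
        ih2
        (fun y hy => pvFB_disj h w (pvW r e bs) e n hy)
        (fun y hy => pvDB_succ_mem h w (pvW r e bs) e n hy)
        (fun y hy => pvDB_succ_not h w (pvW r e bs) e n hy)
        (fun y hy => pvDB_succ_mem h w (pvW r e bs) r n hy)
        (fun y hy => pvDB_succ_not h w (pvW r e bs) r n hy)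
        (fun y m hm => pvDB_mem h w (pvW r e bs) e hWe n hm)
        (fun y m hm => (pvDB_mem h w (pvW r e bs) r hWr n hm).1)
        (fun y hySE hySR => by
          obtain hW | ⟨k, hk1, hkn, hk⟩ := (pvSB_layers h w (pvW r e bs) r n y).1 hySE
          · exact absurd (pvSB_W_sub h w (pvW r e bs) e n hW) hySR
          · exact ⟨(k : Int), pvDB_layer h w (pvW r e bs) r hWr hk1 hkn hk, by exact_mod_cast hkn⟩)
        (fun y hy => pvDB_fresh h w (pvW r e bs) r hWr n hy)
        (fun y hc => by
          obtain ⟨m, hm, h1, _⟩ := (ih4 y).1 hc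
          exact (pvDB_mem h w (pvW r e bs) r hWr n hm).1)
        ih5

-- ==== counting: the claimed set of A equals the strict-distance filter of B ====

theorem pv_len_generic (src : Int × Int × Int) (CR : Std.HashSet (Int × Int × Int))
    (DR DE : Std.HashMap (Int × Int × Int) Int)
    (hchar : ∀ y, y ∈ CR ↔ ∃ m, DR[y]? = some m ∧ 1 ≤ m ∧ ∀ m', DE[y]? = some m' → m < m')
    (hpos : ∀ y m, DR[y]? = some m → (1 ≤ m ↔ y ≠ src)) :
    (CR.size : Int) = (DR.toList.countP (fun p => decide (p.1 ≠ src) &&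
      (match DE[p.1]? with | none => true | some m => decide (p.2 < m))) : Int) := by
  set P : (Int × Int × Int) × Int → Bool := fun p => decide (p.1 ≠ src) &&
      (match DE[p.1]? with | none => true | some m => decide (p.2 < m)) with hP
  have hmain : CR.toList.length = (DR.toList.filter P).length := by
    have hnd : CR.toList.Nodup :=
      List.Pairwise.imp (fun hab => beq_eq_false_iff_ne.1 hab) Std.HashSet.distinct_toList
    have hnd2 : ((DR.toList.filter P).map (fun p => p.1)).Nodup := by
      have hknd : (DR.toList.map (fun p => p.1)).Nodup := by
        have hp : (DR.toList.map (fun p => p.1)).Pairwise (· ≠ ·) := by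
          rw [List.pairwise_map]
          exact List.Pairwise.imp (fun hab => beq_eq_false_iff_ne.1 hab)
            Std.HashMap.distinct_keys_toList
        exact hp
      have hsub : List.Sublist ((DR.toList.filter P).map (fun p => p.1))
          (DR.toList.map (fun p => p.1)) :=
        List.Sublist.map _ List.filter_sublist
      exact List.Nodup.sublist hsub hknd
    have hmem : ∀ y, y ∈ CR.toList ↔ y ∈ (DR.toList.filter P).map (fun p => p.1) := by
      intro y
      rw [Std.HashSet.mem_toList]
      constructor
      · intro hy
        obtain ⟨m, hm, h1, hall⟩ := (hchar y).1 hy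
        refine List.mem_map.2 ⟨(y, m),
          List.mem_filter.2 ⟨Std.HashMap.mem_toList_iff_getElem?_eq_some.2 hm, ?_⟩, rfl⟩
        rw [hP]
        simp only [Bool.and_eq_true, decide_eq_true_eq]
        refine ⟨(hpos y m hm).1 h1, ?_⟩
        cases hde : DE[y]? with
        | none => simp
        | some m0 => exact decide_eq_true (hall m0 hde)
      · intro hy
        obtain ⟨p, hpmem, hpy⟩ := List.mem_map.1 hy
        obtain ⟨hpit, hPp⟩ := List.mem_filter.1 hpmem
        have hget : DR[p.1]? = some p.2 :=
          Std.HashMap.mem_toList_iff_getElem?_eq_some.1 (by simpa using hpit)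
        rw [hP] at hPp
        simp only [Bool.and_eq_true, decide_eq_true_eq] at hPp
        subst hpy
        refine (hchar p.1).2 ⟨p.2, hget, (hpos p.1 p.2 hget).2 hPp.1, ?_⟩
        intro m' hm'
        have hc := hPp.2
        rw [hm'] at hc
        simp only [decide_eq_true_eq] at hc
        exact hc
    have hperm : CR.toList.Perm ((DR.toList.filter P).map (fun p => p.1)) :=
      (List.perm_ext_iff_of_nodup hnd hnd2).2 hmem
    rw [hperm.length_eq, List.length_map]
  rw [← Std.HashSet.length_toList, List.countP_eq_length_filter, hmain]

-- ==== assembling the verdict ====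

theorem pv_main (g : Int × Int) (r e : Int × Int × Int) (b : List (List Int)) :
    mobiusConquer g r e b = mobiusConquer_alt g r e b := by
  have hA : mobiusConquer g r e b =
      pvAnswerA (pvItA g.1 g.2 r e (Std.HashSet.ofList (pvWalls3 b)) (pvFuel g r e)) :=
    pvLoopA_eq g.1 g.2 (pvFuel g r e) _
  have hBr : pvBfs g.1 g.2 (pvW r e (Std.HashSet.ofList (pvWalls3 b))) r (pvFuel g r e) =
      (pvItB g.1 g.2 (pvW r e (Std.HashSet.ofList (pvWalls3 b))) r (pvFuel g r e)).1 :=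
    pvBfsLoop_eq g.1 g.2 (pvFuel g r e) _
  have hBe : pvBfs g.1 g.2 (pvW r e (Std.HashSet.ofList (pvWalls3 b))) e (pvFuel g r e) =
      (pvItB g.1 g.2 (pvW r e (Std.HashSet.ofList (pvWalls3 b))) e (pvFuel g r e)).1 :=
    pvBfsLoop_eq g.1 g.2 (pvFuel g r e) _
  have hwalls : (pvHsUnion (Std.HashSet.ofList (pvWalls3 b)) (Std.HashSet.ofList [r, e])) =
      pvW r e (Std.HashSet.ofList (pvWalls3 b)) := rfl
  obtain ⟨inv1, inv2, inv3, inv4, inv5⟩ :=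
    pvINV g.1 g.2 r e (Std.HashSet.ofList (pvWalls3 b)) (pvFuel g r e)
  have hlenr := pv_len_generic r (pvItA g.1 g.2 r e (Std.HashSet.ofList (pvWalls3 b)) (pvFuel g r e)).2.2.2.1
    (pvItB g.1 g.2 (pvW r e (Std.HashSet.ofList (pvWalls3 b))) r (pvFuel g r e)).1
    (pvItB g.1 g.2 (pvW r e (Std.HashSet.ofList (pvWalls3 b))) e (pvFuel g r e)).1
    inv4
    (fun y m hm => pvDB_pos_iff g.1 g.2 (pvW r e (Std.HashSet.ofList (pvWalls3 b))) r
      (pvW_mem_r r e (Std.HashSet.ofList (pvWalls3 b))) (pvFuel g r e) hm)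
  have hlene := pv_len_generic e (pvItA g.1 g.2 r e (Std.HashSet.ofList (pvWalls3 b)) (pvFuel g r e)).2.2.2.2
    (pvItB g.1 g.2 (pvW r e (Std.HashSet.ofList (pvWalls3 b))) e (pvFuel g r e)).1
    (pvItB g.1 g.2 (pvW r e (Std.HashSet.ofList (pvWalls3 b))) r (pvFuel g r e)).1
    inv5
    (fun y m hm => pvDB_pos_iff g.1 g.2 (pvW r e (Std.HashSet.ofList (pvWalls3 b))) e
      (pvW_mem_e r e (Std.HashSet.ofList (pvWalls3 b))) (pvFuel g r e) hm)
  show mobiusConquer g r e b = mobiusConquer_alt g r e b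
  rw [hA]
  simp only [mobiusConquer_alt]
  rw [hwalls, hBr, hBe]
  simp only [pvAnswerA]
  rw [hlenr, hlene]

-- ===== VERDICT (by name: the statement is the Claim_ definition above) =====
theorem mobiusConquer_spec : Claim_equal_mobiusConquer := by
  intro g r e b _ _
  unfold Spec_mobiusConquer
  exact pv_main g r e b
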